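-- pv_equiv track=rewrite | github.com/parthdacoder/DSA_Practice | Arrays/Max_Consecutive_Zeroes.py | getMaxLength
-- ===== SOURCE A (Python) =====
-- def getMaxLength(arr):
--     count = 0
--     result = 0
--     for i in range(0,len(arr)):
--         if arr[i] != 0:
--             count = 0
--
--         else:
--             count += 1
--             result  = max(count, result)
--     return result
-- ===== SOURCE B (Python) =====
-- def max_gap(bounds):
--     return max(b - a - 1 for a, b in zip(bounds, bounds[1:]))
--
-- def getMaxLength(arr):
--     # Boundary-gap method: record the positions of nonzero elements between
--     # sentinels -1 and len(arr); the longest zero run is the largest gap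
--     # between consecutive boundaries, minus one.
--     return max_gap([-1] + [i for i, x in enumerate(arr) if x != 0] + [len(arr)])
-- ===== Notes on version B (the rewrite author's own statement) =====
-- stated objective: alternative
-- what changed: B computes the index positions of the nonzero elements (with sentinels -1 and len(arr)) and returns the maximum gap between consecutive boundary positions minus one, instead of A's per-element counter-reset with a running max.
import Mathlib
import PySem

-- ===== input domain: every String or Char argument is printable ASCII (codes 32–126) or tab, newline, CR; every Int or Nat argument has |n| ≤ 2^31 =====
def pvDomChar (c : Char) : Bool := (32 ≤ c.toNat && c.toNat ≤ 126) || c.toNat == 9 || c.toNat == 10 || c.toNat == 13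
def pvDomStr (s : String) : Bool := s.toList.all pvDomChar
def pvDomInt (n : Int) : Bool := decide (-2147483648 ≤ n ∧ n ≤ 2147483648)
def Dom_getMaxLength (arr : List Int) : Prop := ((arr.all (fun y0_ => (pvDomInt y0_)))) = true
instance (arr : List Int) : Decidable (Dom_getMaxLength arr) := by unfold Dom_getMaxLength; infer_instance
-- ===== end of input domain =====

-- B records the positions of the nonzero elements between sentinels -1 and len(arr) and
-- returns the largest gap between consecutive boundaries minus one, instead of A's
-- per-element counter-reset with a running max (objective: alternative algorithm).

-- ===== PORT A =====
-- index loop 'for i in range(0,len(arr))' with arr[i]; pyGetD's default is never used (i in range)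
def getMaxLength (arr : List Int) : Int :=
  (PySem.List.pyRange 0 (arr.length : Int) 1).foldl
    (fun (s : Int × Int) i =>
      if PySem.List.pyGetD arr i 0 ≠ 0 then (0, s.2) else (s.1 + 1, max (s.1 + 1) s.2))
    (0, 0) |>.2

-- ===== PORT B =====
-- bounds = [-1] + [i for i, x in enumerate(arr) if x != 0] + [len(arr)];
-- max(...) over zip(bounds, bounds[1:]) — the pair list is always nonempty ([] branch unreachable)
def pvMaxGap (bounds : List Int) : Int :=
  match (bounds.zip bounds.tail).map (fun p => p.2 - p.1 - 1) with
  | [] => 0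
  | h :: t => t.foldl max h

def getMaxLength_alt (arr : List Int) : Int :=
  pvMaxGap (-1 :: ((PySem.List.enumerate arr).filter (fun p => p.2 ≠ 0)).map (fun p => p.1)
       ++ [(arr.length : Int)])

-- ===== PRECONDITION & SPEC =====
def Spec_getMaxLength (arr : List Int) (out : Int) : Prop := out = getMaxLength_alt arr
instance (arr : List Int) (out : Int) : Decidable (Spec_getMaxLength arr out) := by unfold Spec_getMaxLength; infer_instance

-- ===== CLAIM (what is proved, stated in full; the proofs are below) =====
def Claim_equal_getMaxLength : Prop := ∀ (arr : List Int), Dom_getMaxLength arr → Spec_getMaxLength arr (getMaxLength arr)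

-- ===== LEMMAS AND PROOFS =====

-- A's fold over the elements
def pvFoldA (xs : List Int) (s : Int × Int) : Int × Int :=
  xs.foldl (fun s x => if x ≠ 0 then (0, s.2) else (s.1 + 1, max (s.1 + 1) s.2)) s

-- the (Int) indices of the nonzero elements of arr
def pvNZ (arr : List Int) : List Int :=
  ((PySem.List.enumerate arr).filter (fun p => p.2 ≠ 0)).map (fun p => p.1)

-- consecutive gaps (minus one) of a boundary list starting at a
def pvGaps (a : Int) (l : List Int) : List Int :=
  match l with
  | [] => []
  | b :: t => (b - a - 1) :: pvGaps b t

-- last element of l, default a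
def pvLastD (a : Int) (l : List Int) : Int :=
  match l with
  | [] => a
  | b :: t => pvLastD b t

def pvMax0 (l : List Int) : Int := l.foldl max 0

lemma pvMax0_append (l : List Int) (c : Int) : pvMax0 (l ++ [c]) = max (pvMax0 l) c := by
  simp [pvMax0]

lemma pvMax0_nonneg (l : List Int) : 0 ≤ pvMax0 l := by
  induction l using List.reverseRecOn with
  | nil => simp [pvMax0]
  | append_singleton t h ih => rw [pvMax0_append]; exact le_trans ih (le_max_left _ _)

lemma pvLastD_append (a m : Int) (l : List Int) : pvLastD a (l ++ [m]) = m := by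
  induction l generalizing a with
  | nil => rfl
  | cons b t ih => simpa [pvLastD] using ih b

lemma pvGaps_append (l : List Int) : ∀ (a m : Int),
    pvGaps a (l ++ [m]) = pvGaps a l ++ [m - pvLastD a l - 1] := by
  induction l with
  | nil => intro a m; rfl
  | cons b t ih => intro a m; simp [pvGaps, pvLastD, ih b m]

lemma pvNZ_append (arr : List Int) (x : Int) :
    pvNZ (arr ++ [x]) =
      pvNZ arr ++ (if x ≠ 0 then [(arr.length : Int)] else []) := by
  by_cases hx : x = 0 <;>
    simp [pvNZ, PySem.List.enumerate_append, PySem.List.enumerate_cons,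
      List.filter_append, hx]

-- main invariant: A's counter is the trailing-zero count n-1-last(NZ,-1), and A's
-- running max is the max (with 0) of the boundary gaps of NZ ++ [n]

lemma pvMaxShift (G c d : Int) (h : c + 1 = d) : max d (max G c) = max G d := by
  rcases le_total G c with h1 | h1
  · rw [max_eq_right h1, max_eq_left (by omega), max_eq_right (by omega)]
  · rw [max_eq_left h1, max_comm]

lemma pvInvariant (arr : List Int) :
    pvFoldA arr (0, 0) =
      ((arr.length : Int) - 1 - pvLastD (-1) (pvNZ arr),
       pvMax0 (pvGaps (-1) (pvNZ arr ++ [(arr.length : Int)]))) := by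
  induction arr using List.reverseRecOn with
  | nil => simp [pvFoldA, pvNZ, PySem.List.enumerate, pvGaps, pvLastD, pvMax0]
  | append_singleton t x ih =>
    have hfold : pvFoldA (t ++ [x]) (0, 0)
        = (if x ≠ 0 then ((0 : Int), (pvFoldA t (0, 0)).2)
           else ((pvFoldA t (0, 0)).1 + 1, max ((pvFoldA t (0, 0)).1 + 1) (pvFoldA t (0, 0)).2)) := by
      unfold pvFoldA
      rw [List.foldl_append]
      rfl
    by_cases hx : x = 0
    · -- zero appended: NZ unchanged, counter grows, last gap grows by 1
      rw [hfold, if_neg (by simp [hx]), ih]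
      rw [pvNZ_append, if_neg (by simp [hx]), List.append_nil]
      rw [pvGaps_append, pvGaps_append, pvMax0_append, pvMax0_append]
      simp only [Prod.mk.injEq, List.length_append, List.length_cons, List.length_nil,
        Nat.cast_add, Nat.cast_one, Nat.cast_zero]
      constructor
      · ring
      · have e : (t.length : Int) - 1 - pvLastD (-1) (pvNZ t) + 1
              = (t.length : Int) + (0 + 1) - pvLastD (-1) (pvNZ t) - 1 := by ring
        rw [e]
        exact pvMaxShift _ _ _ (by ring)
    · -- nonzero appended: counter resets, NZ gains index n, new last gap is 0
      rw [hfold, if_pos (by simp [hx]), ih]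
      rw [pvNZ_append, if_pos (by simp [hx])]
      rw [pvGaps_append ((pvNZ t) ++ [(t.length : Int)]), pvLastD_append, pvMax0_append]
      simp only [Prod.mk.injEq, List.length_append, List.length_cons, List.length_nil,
        Nat.cast_add, Nat.cast_one, Nat.cast_zero]
      constructor
      · ring
      · have h0 : (t.length : Int) + (0 + 1) - (t.length : Int) - 1 = 0 := by ring
        rw [h0, max_eq_left (pvMax0_nonneg _)]

lemma pvNZ_head_nonneg (arr : List Int) : ∀ y ∈ pvNZ arr, 0 ≤ y := by
  intro y hy
  simp only [pvNZ, List.mem_map, List.mem_filter] at hy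
  obtain ⟨p, ⟨hp, _⟩, rfl⟩ := hy
  rw [PySem.List.mem_enumerate_iff] at hp
  obtain ⟨k, _, rfl⟩ := hp
  simp

-- the zip/map in B's port computes pvGaps
lemma pvZip_eq_gaps (l : List Int) : ∀ (a : Int),
    (((a :: l).zip l).map (fun p => p.2 - p.1 - 1)) = pvGaps a l := by
  induction l with
  | nil => intro a; rfl
  | cons b t ih => intro a; simp [pvGaps, ← ih b]

-- B's port, re-expressed through pvGaps/pvNZ
lemma pvAlt_eq (arr : List Int) :
    getMaxLength_alt arr =
      match pvGaps (-1) (pvNZ arr ++ [(arr.length : Int)]) with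
      | [] => 0
      | h :: t => t.foldl max h := by
  show pvMaxGap (-1 :: (pvNZ arr ++ [(arr.length : Int)])) = _
  unfold pvMaxGap
  rw [List.tail_cons, pvZip_eq_gaps]

-- ===== VERDICT (by name: the statement is the Claim_ definition above) =====
theorem getMaxLength_spec : Claim_equal_getMaxLength := by
  intro arr _
  unfold Spec_getMaxLength getMaxLength
  rw [PySem.List.foldl_pyRange_zero_pyGetD' arr 0
    (fun s x => if x ≠ 0 then (0, s.2) else (s.1 + 1, max (s.1 + 1) s.2)) ((0 : Int), (0 : Int))]
  have hinv := pvInvariant arr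
  simp only [pvFoldA] at hinv
  rw [hinv, pvAlt_eq]
  -- the gaps list is h :: t with h ≥ 0, so foldl max 0 over it equals foldl max h t
  rcases hG : pvGaps (-1) (pvNZ arr ++ [(arr.length : Int)]) with _ | ⟨h, t⟩
  · rcases hNZ : pvNZ arr with _ | ⟨z, zs⟩ <;> rw [hNZ] at hG <;> simp [pvGaps] at hG
  · have hh : 0 ≤ h := by
      rcases hNZ : pvNZ arr with _ | ⟨z, zs⟩
      · rw [hNZ] at hG; simp [pvGaps] at hG; omega
      · have hz : 0 ≤ z := pvNZ_head_nonneg arr z (by rw [hNZ]; simp)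
        rw [hNZ] at hG; simp [pvGaps] at hG; omega
    show pvMax0 (h :: t) = t.foldl max h
    simp [pvMax0, max_eq_right hh]
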